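-- pv_equiv track=rewrite | github.com/muriloOliveira7/7001ICT-Programming-Principles | 5194077MAGO/ws08/problem5.py | checkBookFever
-- ===== SOURCE A (Python) =====
-- def checkBookFever (list,bookFeverList):
--     """Check the first infected person or new ones based
--     on a list of infected pesrsons and a record meeting"""
--     newInfected = []
--     #Check if there is already someone infected
--     if not bookFeverList:
--         for x in range(len(list)):
--             for c in list[x-1]:
--                 #Check for the simbol for first infected person
--                 if c == '*':
--                     #Append first infected and remove the simbol
--                     bookFeverList.append(list[x-1][:-1])
--                     #Append individuals next him
--                     bookFeverList.append(list[x-2])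
--                     bookFeverList.append(list[x])
--     else:
--         for x in range(len(list)):
--             for j in range (len(bookFeverList)):
--                 #Check if the person before him is infected
--                 #If he is infected add this person a pre-list
--                 if list[x-1] == bookFeverList [j]:
--                     for name in bookFeverList:
--                         #Check if the new infected person is not on pre-list or final list
--                         if list[x] not in bookFeverList:
--                             if list[x] not in newInfected:
--                                 newInfected.append(list[x])
--                 #Check if the person is infected
--                 #If he is add the person before him to the pre-list
--                 elif list[x] == bookFeverList [j]:
--                     for name in bookFeverList:
--                         #Check if the new infected person is not on pre-list or final list
--                         if list[x-1] not in bookFeverList: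
--                             if list[x-1] not in newInfected:
--                                 newInfected.append(list[x-1])
--
--     #Add pre-list to final list
--     bookFeverList = bookFeverList + newInfected
--     return bookFeverList
-- ===== SOURCE B (Python) =====
-- def checkBookFever(list, bookFeverList):
--     """Seed from the '*'-marked entry when nobody is infected yet; otherwise
--     collect the healthy half of every mixed (previous, current) contact pair
--     and append the first occurrences.  (Mutates bookFeverList only when it
--     arrives empty, by extending it with the seed names.)"""
--     if not bookFeverList:
--         trios = [(list[x - 1][:-1], list[x - 2], list[x])
--                  for x in range(len(list)) if '*' in list[x - 1]]
--         for trio in trios: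
--             bookFeverList.extend(trio)
--         return bookFeverList
--     infected = set(bookFeverList)
--     pairs = zip(list[-1:] + list[:-1], list)
--     candidates = (cur if prev in infected else prev
--                   for prev, cur in pairs
--                   if (prev in infected) != (cur in infected))
--     return bookFeverList + [*dict.fromkeys(candidates)]
-- ===== Notes on version B (the rewrite author's own statement) =====
-- stated objective: faster
-- what changed: A's quadruple-nested membership-scan propagation is replaced by a zip of the list with its rotation, an XOR filter selecting the healthy half of each mixed contact pair, and one dict.fromkeys dedup; the seeding branch becomes a comprehension of trios extended onto the list. Pre_ excludes the single-entry starred list with nobody infected, where A (and B) raise IndexError on list[x-2].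
-- intended difference: When nobody is infected yet and some meeting entry contains two or more '*' characters, A appends the seeding trio once per '*' (duplicating the seed names), while B appends it once per marked entry, which is the intended seeding. — e.g. on checkBookFever(["a**", "b"], []): A returns ["a*", "b", "b", "a*", "b", "b"], B returns ["a*", "b", "b"]
import Mathlib
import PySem

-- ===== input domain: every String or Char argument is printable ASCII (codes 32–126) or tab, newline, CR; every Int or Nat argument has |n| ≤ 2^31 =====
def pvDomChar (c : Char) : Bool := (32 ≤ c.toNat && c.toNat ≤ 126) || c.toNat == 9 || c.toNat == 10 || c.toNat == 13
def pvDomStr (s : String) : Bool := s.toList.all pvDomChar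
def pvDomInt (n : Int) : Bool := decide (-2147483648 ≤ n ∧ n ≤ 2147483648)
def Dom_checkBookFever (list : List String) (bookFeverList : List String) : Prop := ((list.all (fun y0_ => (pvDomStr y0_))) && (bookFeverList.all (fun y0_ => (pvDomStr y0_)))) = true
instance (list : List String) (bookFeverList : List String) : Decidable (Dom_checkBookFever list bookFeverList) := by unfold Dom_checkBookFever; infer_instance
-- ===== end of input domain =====

-- B replaces A's nested propagation loops by a rotate-zip-filter-dedup pipeline (objective:
-- faster). A mutates bookFeverList in place in its seeding branch (B does the same);
-- the equivalence proved here is about the RETURN value.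

-- ===== PORT A =====
def checkBookFever (list : List String) (bookFeverList : List String) : List String :=
  if bookFeverList = [] then
    -- for x in range(len(list)): for c in list[x-1]: if c == '*': append the three names
    let bfl := (PySem.List.pyRange 0 (list.length : Int) 1).foldl (fun bfl x =>
      (PySem.List.pyGetD list (x - 1) "").toList.foldl (fun bfl c =>
        if c = '*' then
          ((bfl ++ [PySem.Str.slice (PySem.List.pyGetD list (x - 1) "") none (some (-1))])
            ++ [PySem.List.pyGetD list (x - 2) ""])
            ++ [PySem.List.pyGetD list x ""]
        else bfl) bfl) bookFeverList
    bfl ++ ([] : List String)          -- bookFeverList + newInfected, newInfected = []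
  else
    let newInfected := (PySem.List.pyRange 0 (list.length : Int) 1).foldl (fun ni x =>
      (PySem.List.pyRange 0 (bookFeverList.length : Int) 1).foldl (fun ni j =>
        if PySem.List.pyGetD list (x - 1) "" = PySem.List.pyGetD bookFeverList j "" then
          bookFeverList.foldl (fun ni _name =>
            if PySem.List.pyGetD list x "" ∉ bookFeverList ∧ PySem.List.pyGetD list x "" ∉ ni then
              ni ++ [PySem.List.pyGetD list x ""]
            else ni) ni
        else if PySem.List.pyGetD list x "" = PySem.List.pyGetD bookFeverList j "" then
          bookFeverList.foldl (fun ni _name =>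
            if PySem.List.pyGetD list (x - 1) "" ∉ bookFeverList ∧ PySem.List.pyGetD list (x - 1) "" ∉ ni then
              ni ++ [PySem.List.pyGetD list (x - 1) ""]
            else ni) ni
        else ni) ni) ([] : List String)
    bookFeverList ++ newInfected

-- ===== PORT B =====
-- 'dict.fromkeys' dedup (first occurrences, in order) is PySem.List.dedup.
def checkBookFever_alt (list : List String) (bookFeverList : List String) : List String :=
  if bookFeverList = [] then
    let trios := ((PySem.List.pyRange 0 (list.length : Int) 1).filter
        (fun x => (PySem.List.pyGetD list (x - 1) "").toList.contains '*')).map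
      (fun x => (PySem.Str.slice (PySem.List.pyGetD list (x - 1) "") none (some (-1)),
                 PySem.List.pyGetD list (x - 2) "", PySem.List.pyGetD list x ""))
    trios.foldl (fun bfl t => bfl ++ [t.1, t.2.1, t.2.2]) bookFeverList
  else
    let infected : PySem.Set String := PySem.Set.ofList bookFeverList
    let pairs := (PySem.List.slice list (some (-1)) none
                    ++ PySem.List.slice list none (some (-1))).zip list
    let candidates := (pairs.filter
        (fun pc => PySem.Set.contains infected pc.1 != PySem.Set.contains infected pc.2)).map
      (fun pc => if PySem.Set.contains infected pc.1 then pc.2 else pc.1)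
    bookFeverList ++ PySem.List.dedup candidates

-- ===== PRECONDITION & SPEC =====
-- Pre_ excludes exactly the inputs on which Python A raises IndexError (and Python B raises too):
-- no one infected yet, a single-person meeting list whose only entry carries '*' — then list[x-2] is out of range.
def Pre_checkBookFever (list : List String) (bookFeverList : List String) : Prop :=
  ¬ (bookFeverList = [] ∧ list.length = 1 ∧ '*' ∈ (list.headD "").toList)
instance (list : List String) (bookFeverList : List String) : Decidable (Pre_checkBookFever list bookFeverList) := by
  unfold Pre_checkBookFever; infer_instance
def pvWitness_checkBookFever : List String × List String := (["anna", "bob*", "carl"], [])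

-- When nobody is infected yet and some meeting entry contains two or more '*' characters,
-- A appends the seeding trio once per '*' (duplicating the seed names), while B appends it
-- once per marked entry, which is the intended seeding.
def D_checkBookFever (list : List String) (bookFeverList : List String) : Prop :=
  bookFeverList = [] ∧ ∃ s ∈ list, 2 ≤ s.toList.count '*'
instance (list : List String) (bookFeverList : List String) : Decidable (D_checkBookFever list bookFeverList) := by
  unfold D_checkBookFever; infer_instance

def Spec_checkBookFever (list : List String) (bookFeverList : List String) (out : List String) : Prop :=
  ¬ D_checkBookFever list bookFeverList → out = checkBookFever_alt list bookFeverList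
instance (list : List String) (bookFeverList : List String) (out : List String) : Decidable (Spec_checkBookFever list bookFeverList out) := by
  unfold Spec_checkBookFever; infer_instance

def pvDiffWitness_checkBookFever : List String × List String := (["a**", "b"], [])
def pvDiffWitnessOut_checkBookFever : (List String) × (List String) :=
  (["a*", "b", "b", "a*", "b", "b"], ["a*", "b", "b"])

-- ===== CLAIM (what is proved, stated in full; the proofs are below) =====
def Claim_unchanged_checkBookFever : Prop := ∀ (list : List String) (bookFeverList : List String), Dom_checkBookFever list bookFeverList → Pre_checkBookFever list bookFeverList → Spec_checkBookFever list bookFeverList (checkBookFever list bookFeverList)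
def Claim_changed_checkBookFever : Prop := Dom_checkBookFever (pvDiffWitness_checkBookFever.1) (pvDiffWitness_checkBookFever.2) ∧ Pre_checkBookFever (pvDiffWitness_checkBookFever.1) (pvDiffWitness_checkBookFever.2) ∧ D_checkBookFever (pvDiffWitness_checkBookFever.1) (pvDiffWitness_checkBookFever.2) ∧ checkBookFever (pvDiffWitness_checkBookFever.1) (pvDiffWitness_checkBookFever.2) = pvDiffWitnessOut_checkBookFever.1 ∧ checkBookFever_alt (pvDiffWitness_checkBookFever.1) (pvDiffWitness_checkBookFever.2) = pvDiffWitnessOut_checkBookFever.2 ∧ pvDiffWitnessOut_checkBookFever.1 ≠ pvDiffWitnessOut_checkBookFever.2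

def Claim_exact_checkBookFever : Prop := ∀ (list : List String) (bookFeverList : List String), Dom_checkBookFever list bookFeverList → Pre_checkBookFever list bookFeverList → D_checkBookFever list bookFeverList → checkBookFever list bookFeverList ≠ checkBookFever_alt list bookFeverList

-- ===== LEMMAS AND PROOFS =====


theorem pv_pairs_eq (list : List String) :
    (PySem.List.slice list (some (-1)) none ++ PySem.List.slice list none (some (-1))).zip list
      = (PySem.List.pyRange 0 (list.length : Int) 1).map
          (fun x => (PySem.List.pyGetD list (x - 1) "", PySem.List.pyGetD list x "")) := by
  rw [PySem.List.slice_from_neg_one, PySem.List.slice_to_neg_one,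
    PySem.List.pyRange_zero_natCast, List.map_map]
  apply List.ext_getElem
  · cases list with
    | nil => simp
    | cons a l =>
      simp only [List.length_zip, List.length_append, List.length_drop,
        List.length_dropLast, List.length_map, List.length_range, List.length_cons]
      omega
  · intro i h1 h2
    have hn : i < list.length := by simpa using h2
    have hlen : (list.drop (list.length - 1)).length = min 1 list.length := by
      simp [List.length_drop]; omega
    rw [List.getElem_zip]
    simp only [List.getElem_map, List.getElem_range, Function.comp]
    simp only [Prod.mk.injEq]
    cases i with
    | zero =>
      have hne : list ≠ [] := by intro h; simp [h] at hn
      simp only [Nat.cast_zero, zero_sub]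
      rw [PySem.List.pyGetD_neg_one list "" hne]
      constructor
      · rw [List.getElem_append_left (by omega)]
        rw [List.getElem_drop]
        simp [List.getLast_eq_getElem]
      · simp [PySem.List.pyGetD_zero, List.getD_eq_getElem?_getD, List.getElem?_eq_getElem hn]
    | succ j =>
      have hj : j < list.length - 1 := by omega
      constructor
      · rw [List.getElem_append_right (by omega)]
        have he : (list.dropLast)[j + 1 - (list.drop (list.length - 1)).length]'(by simp [List.length_dropLast]; omega)
            = list.dropLast[j]'(by simp [List.length_dropLast]; omega) := by
          congr 1; omega
        rw [he, List.getElem_dropLast]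
        rw [show ((((j:Nat) + 1 : Nat)):Int) - 1 = ((j:Nat):Int) by push_cast; ring]
        simp [PySem.List.pyGetD_natCast, List.getD_eq_getElem?_getD, List.getElem?_eq_getElem (show j < list.length by omega)]
      · rw [PySem.List.pyGetD_natCast]
        simp [List.getD_eq_getElem?_getD, List.getElem?_eq_getElem hn]


-- the net effect of A's "ensure v is recorded" loop (and of its conditional append):
def pvAdd (m : List String) (v : String) (ni : List String) : List String :=
  if v ∉ m ∧ v ∉ ni then ni ++ [v] else ni

-- the inner 'for name in bookFeverList' loop is a no-op once v is on either list …
theorem pv_ensure_skip (bl : List String) (v : String) :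
    ∀ (l : List String) (ni : List String), (v ∈ bl ∨ v ∈ ni) →
      l.foldl (fun ni (_ : String) => if v ∉ bl ∧ v ∉ ni then ni ++ [v] else ni) ni = ni := by
  intro l
  induction l with
  | nil => intro ni _; rfl
  | cons a l ih =>
    intro ni h
    have : (if v ∉ bl ∧ v ∉ ni then ni ++ [v] else ni) = ni := by
      split_ifs with h1 <;> simp_all
    simpa [this] using ih ni h

-- … and otherwise it appends v exactly once (bl nonempty):
theorem pv_ensure_fold (bl : List String) (v : String) (l : List String) (hl : l ≠ [])
    (ni : List String) :
    l.foldl (fun ni (_ : String) => if v ∉ bl ∧ v ∉ ni then ni ++ [v] else ni) ni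
      = if v ∉ bl ∧ v ∉ ni then ni ++ [v] else ni := by
  cases l with
  | nil => exact absurd rfl hl
  | cons a l =>
    simp only [List.foldl_cons]
    split_ifs with h1
    · exact pv_ensure_skip bl v l (ni ++ [v]) (Or.inr (by simp))
    · exact pv_ensure_skip bl v l ni (by rcases not_and_or.mp h1 with h | h <;> simp_all)

theorem pvAdd_idem (m : List String) (v : String) (ni : List String) :
    pvAdd m v (pvAdd m v ni) = pvAdd m v ni := by
  unfold pvAdd; split_ifs with h1 h2 <;> simp_all

theorem pvAdd_of_mem (m : List String) (v : String) (ni : List String) (h : v ∈ m) :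
    pvAdd m v ni = ni := by
  unfold pvAdd; split_ifs with h1 <;> simp_all

-- A's whole 'for j in range(len(bookFeverList))' body, collapsed: at most one name is appended
theorem pv_jfold (m : List String) (hm : m ≠ []) (p v : String) :
    ∀ (l : List String), (∀ x ∈ l, x ∈ m) → ∀ (ni : List String),
      l.foldl (fun ni name =>
          if p = name then
            m.foldl (fun ni (_ : String) => if v ∉ m ∧ v ∉ ni then ni ++ [v] else ni) ni
          else if v = name then
            m.foldl (fun ni (_ : String) => if p ∉ m ∧ p ∉ ni then ni ++ [p] else ni) ni
          else ni) ni
      = if p ∈ l then pvAdd m v ni else if v ∈ l then pvAdd m p ni else ni := by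
  intro l
  induction l with
  | nil => intro _ ni; rfl
  | cons a l ih =>
    intro hsub ni
    have ham : a ∈ m := hsub a (by simp)
    have hsub' : ∀ x ∈ l, x ∈ m := fun x hx => hsub x (by simp [hx])
    simp only [List.foldl_cons]
    by_cases hp : p = a
    · rw [if_pos hp, pv_ensure_fold m v m hm ni,
        show (if v ∉ m ∧ v ∉ ni then ni ++ [v] else ni) = pvAdd m v ni from rfl,
        ih hsub' (pvAdd m v ni), if_pos (show p ∈ a :: l by simp [hp])]
      have hpm : p ∈ m := hp ▸ ham
      split_ifs with h1 h2
      · exact pvAdd_idem m v ni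
      · exact pvAdd_of_mem m p (pvAdd m v ni) hpm
      · rfl
    · rw [if_neg hp]
      by_cases hv : v = a
      · rw [if_pos hv, pv_ensure_fold m p m hm ni,
          show (if p ∉ m ∧ p ∉ ni then ni ++ [p] else ni) = pvAdd m p ni from rfl,
          ih hsub' (pvAdd m p ni)]
        by_cases h1 : p ∈ l
        · rw [if_pos h1, pvAdd_of_mem m p ni (hsub' p h1),
            if_pos (show p ∈ a :: l from List.mem_cons_of_mem a h1)]
        · rw [if_neg h1, if_neg (show ¬ p ∈ a :: l by simp [hp, h1]),
            if_pos (show v ∈ a :: l by simp [hv])]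
          by_cases h2 : v ∈ l
          · rw [if_pos h2]; exact pvAdd_idem m p ni
          · rw [if_neg h2]
      · rw [if_neg hv, ih hsub' ni]
        simp only [List.mem_cons, hp, hv, false_or]

-- A's collapsed per-meeting step (with Prop membership) …
def pvStep (list m : List String) (ni : List String) (x : Int) : List String :=
  if PySem.List.pyGetD list (x - 1) "" ∈ m then
    pvAdd m (PySem.List.pyGetD list x "") ni
  else if PySem.List.pyGetD list x "" ∈ m then
    pvAdd m (PySem.List.pyGetD list (x - 1) "") ni
  else ni

-- … is exactly B's XOR-select-add step:
theorem pv_step_eq (list m : List String) (ni : List String) (x : Int) :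
    pvStep list m ni x =
      if (PySem.Set.contains (PySem.Set.ofList m) (PySem.List.pyGetD list (x - 1) "")
          != PySem.Set.contains (PySem.Set.ofList m) (PySem.List.pyGetD list x "")) = true then
        PySem.Set.add ni
          (if PySem.Set.contains (PySem.Set.ofList m) (PySem.List.pyGetD list (x - 1) "") then
            PySem.List.pyGetD list x "" else PySem.List.pyGetD list (x - 1) "")
      else ni := by
  unfold pvStep pvAdd
  simp only [PySem.Set.contains_eq_listContains, List.contains_eq_mem, PySem.Set.mem_ofList,
    PySem.Set.add_eq_ite, bne_iff_ne, ne_eq, decide_eq_decide, decide_eq_true_eq]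
  split_ifs <;> simp_all

-- each '*' fires the same three appends: the char scan is iterating g count-many times
theorem pv_foldl_star {β : Type} (g : β → β) :
    ∀ (cs : List Char) (acc : β),
      cs.foldl (fun b c => if c = '*' then g b else b) acc = g^[cs.count '*'] acc := by
  intro cs
  induction cs with
  | nil => intro acc; rfl
  | cons c cs ih =>
    intro acc
    by_cases h : c = '*'
    · subst h
      simp [ih, Function.iterate_succ_apply]
    · simp [h, ih]

theorem pv_ofList_map {α β : Type} [BEq β] (f : α → β) (l : List α) :
    PySem.Set.ofList (l.map f) = l.foldl (fun s x => PySem.Set.add s (f x)) [] := by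
  rw [PySem.Set.ofList_eq_foldl, List.foldl_map]

theorem checkBookFever_spec : Claim_unchanged_checkBookFever := by
  intro list bookFeverList _hdom _hpre hnd
  unfold D_checkBookFever at hnd
  unfold checkBookFever checkBookFever_alt
  by_cases hb : bookFeverList = []
  · -- seeding branch
    have hcount : ∀ s ∈ list, s.toList.count '*' ≤ 1 := by
      intro s hs
      by_contra hcc
      exact hnd ⟨hb, s, hs, by omega⟩
    simp only [if_pos hb, List.append_nil]
    rw [List.foldl_map, ← PySem.List.foldl_if_eq_foldl_filter]
    apply PySem.List.foldl_congr_mem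
    intro acc x hx
    have hx' : 0 ≤ x ∧ x < (list.length : Int) := (PySem.List.mem_pyRange_one).1 hx
    have hmem : PySem.List.pyGetD list (x - 1) "" ∈ list := by
      apply PySem.List.pyGetD_mem
      unfold PySem.Raise.InRange
      omega
    have hc := hcount _ hmem
    rw [pv_foldl_star]
    rcases Nat.lt_or_ge ((PySem.List.pyGetD list (x - 1) "").toList.count '*') 1 with h0 | h1
    · have h0' : (PySem.List.pyGetD list (x - 1) "").toList.count '*' = 0 := by omega
      have hnm : '*' ∉ (PySem.List.pyGetD list (x - 1) "").toList :=
        (List.count_eq_zero).1 h0'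
      rw [h0']
      simp [List.contains_eq_mem, hnm]
    · have h1' : (PySem.List.pyGetD list (x - 1) "").toList.count '*' = 1 := by omega
      have hm : '*' ∈ (PySem.List.pyGetD list (x - 1) "").toList :=
        List.count_pos_iff.mp (by omega)
      rw [h1']
      simp [List.contains_eq_mem, hm]
  · -- propagation branch
    simp only [if_neg hb]
    congr 1
    have hA : (fun (ni : List String) (x : Int) =>
        (PySem.List.pyRange 0 (bookFeverList.length : Int) 1).foldl (fun ni j =>
          if PySem.List.pyGetD list (x - 1) "" = PySem.List.pyGetD bookFeverList j "" then
            bookFeverList.foldl (fun ni (_ : String) =>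
              if PySem.List.pyGetD list x "" ∉ bookFeverList ∧ PySem.List.pyGetD list x "" ∉ ni then
                ni ++ [PySem.List.pyGetD list x ""]
              else ni) ni
          else if PySem.List.pyGetD list x "" = PySem.List.pyGetD bookFeverList j "" then
            bookFeverList.foldl (fun ni (_ : String) =>
              if PySem.List.pyGetD list (x - 1) "" ∉ bookFeverList ∧ PySem.List.pyGetD list (x - 1) "" ∉ ni then
                ni ++ [PySem.List.pyGetD list (x - 1) ""]
              else ni) ni
          else ni) ni) = pvStep list bookFeverList := by
      funext ni x
      rw [PySem.List.foldl_pyRange_zero_pyGetD' bookFeverList ""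
        (fun ni name =>
          if PySem.List.pyGetD list (x - 1) "" = name then
            bookFeverList.foldl (fun ni (_ : String) =>
              if PySem.List.pyGetD list x "" ∉ bookFeverList ∧ PySem.List.pyGetD list x "" ∉ ni then
                ni ++ [PySem.List.pyGetD list x ""]
              else ni) ni
          else if PySem.List.pyGetD list x "" = name then
            bookFeverList.foldl (fun ni (_ : String) =>
              if PySem.List.pyGetD list (x - 1) "" ∉ bookFeverList ∧ PySem.List.pyGetD list (x - 1) "" ∉ ni then
                ni ++ [PySem.List.pyGetD list (x - 1) ""]
              else ni) ni
          else ni) ni]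
      rw [pv_jfold bookFeverList hb _ _ bookFeverList (fun x hx => hx) ni]
      rfl
    rw [hA]
    -- collapse A's fold to B's pipeline
    have hstep : (PySem.List.pyRange 0 (list.length : Int) 1).foldl (pvStep list bookFeverList) []
        = (PySem.List.pyRange 0 (list.length : Int) 1).foldl
            (fun ni x =>
              if (PySem.Set.contains (PySem.Set.ofList bookFeverList) (PySem.List.pyGetD list (x - 1) "")
                  != PySem.Set.contains (PySem.Set.ofList bookFeverList) (PySem.List.pyGetD list x "")) = true then
                PySem.Set.add ni
                  (if PySem.Set.contains (PySem.Set.ofList bookFeverList) (PySem.List.pyGetD list (x - 1) "") then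
                    PySem.List.pyGetD list x "" else PySem.List.pyGetD list (x - 1) "")
              else ni) [] := by
      apply PySem.List.foldl_congr_mem
      intro acc x _
      exact pv_step_eq list bookFeverList acc x
    rw [hstep, pv_pairs_eq, List.filter_map, List.map_map,
      PySem.List.foldl_if_eq_foldl_filter, PySem.List.dedup_eq_ofList, pv_ofList_map]
    rfl

-- ----- A ≠ B everywhere inside D_ : the two results have different lengths -----

-- length of a fold whose step appends 3 * k x elements
theorem pv_len_fold {α : Type} (f : List String → α → List String) (k : α → Nat)
    (h : ∀ acc x, (f acc x).length = acc.length + 3 * k x) :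
    ∀ (l : List α) (acc : List String),
      (l.foldl f acc).length = acc.length + 3 * (l.map k).sum := by
  intro l
  induction l with
  | nil => intro acc; simp
  | cons a l ih => intro acc; simp [List.foldl_cons, ih, h]; ring

theorem pv_len_inner (a b c : String) (cs : List Char) (acc : List String) :
    (cs.foldl (fun bfl ch => if ch = '*' then ((bfl ++ [a]) ++ [b]) ++ [c] else bfl) acc).length
      = acc.length + 3 * cs.count '*' := by
  induction cs generalizing acc with
  | nil => simp
  | cons ch cs ih =>
    simp only [List.foldl_cons]
    by_cases h : ch = '*'
    · rw [if_pos h, ih]; simp [h]; ring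
    · rw [if_neg h, ih]; simp [h]

theorem pv_cnt_weak : ∀ (l : List String),
    l.countP (fun s => decide ('*' ∈ s.toList)) ≤ (l.map (fun s => s.toList.count '*')).sum := by
  intro l
  induction l with
  | nil => simp
  | cons s l ih =>
    by_cases h : '*' ∈ s.toList
    · have : 1 ≤ s.toList.count '*' := List.count_pos_iff.mpr h
      simp [h]
      omega
    · have : s.toList.count '*' = 0 := List.count_eq_zero.mpr h
      simp [h, this]
      omega

theorem pv_cnt_strict : ∀ (l : List String), (∃ s ∈ l, 2 ≤ s.toList.count '*') →
    l.countP (fun s => decide ('*' ∈ s.toList)) + 1 ≤ (l.map (fun s => s.toList.count '*')).sum := by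
  intro l
  induction l with
  | nil => rintro ⟨s, hs, _⟩; simp at hs
  | cons a l ih =>
    rintro ⟨s, hs, hc⟩
    rcases List.mem_cons.mp hs with rfl | hmem
    · have h1 : '*' ∈ s.toList := List.count_pos_iff.mp (by omega)
      have := pv_cnt_weak l
      simp [h1]
      omega
    · have := ih ⟨s, hmem, hc⟩
      by_cases h : '*' ∈ a.toList
      · have : 1 ≤ a.toList.count '*' := List.count_pos_iff.mpr h
        simp [h]
        omega
      · have h0 : a.toList.count '*' = 0 := List.count_eq_zero.mpr h
        simp [h, h0]
        omega

-- the entries A's (and B's) seeding scan visits are the rotation of the meeting list …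
theorem pv_rot_eq (list : List String) :
    (PySem.List.pyRange 0 (list.length : Int) 1).map (fun x => PySem.List.pyGetD list (x - 1) "")
      = list.drop (list.length - 1) ++ list.dropLast := by
  have h := congrArg (List.map Prod.fst) (pv_pairs_eq list)
  rw [PySem.List.slice_from_neg_one, PySem.List.slice_to_neg_one] at h
  rw [List.map_fst_zip (by
      simp only [List.length_append, List.length_drop, List.length_dropLast]
      omega)] at h
  rw [List.map_map] at h
  exact h.symm

-- … and the rotation is a permutation of the meeting list
theorem pv_rot_perm (list : List String) :
    (list.drop (list.length - 1) ++ list.dropLast).Perm list := by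
  rw [List.dropLast_eq_take]
  exact (List.perm_append_comm).trans (by rw [List.take_append_drop])

theorem pv_lenA (list : List String) :
    (checkBookFever list []).length = 3 * (list.map (fun s => s.toList.count '*')).sum := by
  unfold checkBookFever
  rw [if_pos rfl]
  simp only [List.append_nil]
  rw [pv_len_fold _ (fun x => (PySem.List.pyGetD list (x - 1) "").toList.count '*')
      (fun acc x => pv_len_inner _ _ _ _ acc)]
  rw [show (fun (x : Int) => (PySem.List.pyGetD list (x - 1) "").toList.count '*')
        = (fun s => s.toList.count '*') ∘ (fun x => PySem.List.pyGetD list (x - 1) "") from rfl,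
    ← List.map_map, pv_rot_eq,
    List.Perm.sum_eq ((pv_rot_perm list).map (fun s => s.toList.count '*'))]
  simp

theorem pv_lenB (list : List String) :
    (checkBookFever_alt list []).length
      = 3 * list.countP (fun s => decide ('*' ∈ s.toList)) := by
  unfold checkBookFever_alt
  rw [if_pos rfl]
  rw [pv_len_fold _ (fun _ => 1) (fun acc t => by simp)]
  simp only [List.length_nil, List.map_const', List.sum_replicate, smul_eq_mul, mul_one,
    List.length_map, Nat.zero_add]
  congr 1
  rw [← List.countP_eq_length_filter,
    show (fun (x : Int) => (PySem.List.pyGetD list (x - 1) "").toList.contains '*')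
        = (fun (s : String) => s.toList.contains '*') ∘ (fun x => PySem.List.pyGetD list (x - 1) "") from rfl,
    ← List.countP_map, pv_rot_eq,
    List.Perm.countP_eq _ ((pv_rot_perm list))]
  simp [List.contains_eq_mem]


-- ===== VERDICT =====
theorem checkBookFever_changed : Claim_changed_checkBookFever := by
  unfold Claim_changed_checkBookFever; decide

theorem checkBookFever_tight : Claim_exact_checkBookFever := by
  intro list bookFeverList _hdom _hpre hd heq
  unfold D_checkBookFever at hd
  obtain ⟨hb, hex⟩ := hd
  subst hb
  have hlen := congrArg List.length heq
  rw [pv_lenA, pv_lenB] at hlen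
  have := pv_cnt_strict list hex
  omega
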